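-- pv_equiv track=rewrite | github.com/RelevanceAI/relevanceai | relevanceai/dataset/dataset.py | _return_sort_in_metrics
-- ===== SOURCE A (Python) =====
-- def _return_sort_in_metrics(metric_name, metrics):
--     if metric_name in [m["name"] for m in metrics]:
--         return metric_name
--     elif metric_name in [m["field"] for m in metrics]:
--         for m in metrics:
--             if metric_name == m["field"]:
--                 return m["name"]
--     else:
--         raise KeyError(f"'{metric_name}' is not found in 'metrics'")
-- ===== SOURCE B (Python) =====
-- def _return_sort_in_metrics(metric_name, metrics):
--     # single pass: any name match is decisive; remember the first field match
--     field_name = None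
--     for m in metrics:
--         if m["name"] == metric_name:
--             return metric_name
--         if field_name is None and m.get("field") == metric_name:
--             field_name = m["name"]
--     if field_name is not None:
--         return field_name
--     raise KeyError(f"'{metric_name}' is not found in 'metrics'")
-- ===== Notes on version B (the rewrite author's own statement) =====
-- stated objective: simpler
-- what changed: A's three scans (a name list, a field list, then a search loop) are fused into one loop that returns on a name match and remembers the first field match via m.get('field').
import Mathlib
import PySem

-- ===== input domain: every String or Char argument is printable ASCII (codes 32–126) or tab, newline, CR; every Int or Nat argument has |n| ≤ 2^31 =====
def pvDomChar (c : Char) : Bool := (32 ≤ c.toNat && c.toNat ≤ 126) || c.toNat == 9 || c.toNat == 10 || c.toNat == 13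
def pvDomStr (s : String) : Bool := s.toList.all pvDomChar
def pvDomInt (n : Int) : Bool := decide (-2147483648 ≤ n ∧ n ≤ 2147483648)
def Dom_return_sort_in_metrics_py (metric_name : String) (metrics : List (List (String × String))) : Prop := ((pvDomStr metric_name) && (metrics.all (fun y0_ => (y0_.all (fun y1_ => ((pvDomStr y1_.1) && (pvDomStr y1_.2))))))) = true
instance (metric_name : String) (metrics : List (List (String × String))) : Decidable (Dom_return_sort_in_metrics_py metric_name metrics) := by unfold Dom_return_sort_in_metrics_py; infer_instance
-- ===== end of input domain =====

-- B fuses A's three scans (name list, field list, search loop) into one single-pass loop using m.get("field"). Return-value equivalence on Pre_ (A's non-raising inputs).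

-- shared helper: m[k] on an assoc list (first match); "" stands in for a KeyError, excluded by Pre_
def pyGetKey (m : List (String × String)) (k : String) : String := (m.lookup k).getD ""

-- ===== PORT A =====
-- A's 'for m in metrics: if metric_name == m["field"]: return m["name"]'
def rsLoopA (metric_name : String) : List (List (String × String)) → String
  | [] => ""
  | m :: rest => if metric_name == pyGetKey m "field" then pyGetKey m "name" else rsLoopA metric_name rest

def return_sort_in_metrics_py (metric_name : String) (metrics : List (List (String × String))) : String :=
  if (metrics.map (fun m => pyGetKey m "name")).contains metric_name then metric_name
  else if (metrics.map (fun m => pyGetKey m "field")).contains metric_name then rsLoopA metric_name metrics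
  else ""  -- KeyError in A, excluded by Pre_

-- ===== PORT B =====
-- B's single loop carrying field_name : Option String; m.get("field") is List.lookup (None ≠ metric_name, so compare with 'some')
def rsLoopB (metric_name : String) : List (List (String × String)) → Option String → String
  | [], fieldName => fieldName.getD ""  -- none = KeyError in B, excluded by Pre_
  | m :: rest, fieldName =>
    if pyGetKey m "name" == metric_name then metric_name
    else if fieldName.isNone && (List.lookup "field" m == some metric_name) then
      rsLoopB metric_name rest (some (pyGetKey m "name"))
    else rsLoopB metric_name rest fieldName

def return_sort_in_metrics_py_alt (metric_name : String) (metrics : List (List (String × String))) : String :=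
  rsLoopB metric_name metrics none

-- ===== PRECONDITION & SPEC =====
-- does the assoc-list dict m carry key k?
def hasK (m : List (String × String)) (k : String) : Bool := (List.lookup k m).isSome

-- Pre_ excludes exactly the inputs on which A raises KeyError: a dict lacking "name" (first
-- comprehension), or no name match and either a dict lacking "field" (second comprehension)
-- or no field match (the explicit raise).
def Pre_return_sort_in_metrics_py (metric_name : String) (metrics : List (List (String × String))) : Prop :=
  (∀ m ∈ metrics, hasK m "name") ∧
  ((∃ m ∈ metrics, pyGetKey m "name" = metric_name) ∨
    ((∀ m ∈ metrics, hasK m "field") ∧ ∃ m ∈ metrics, pyGetKey m "field" = metric_name))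
instance (metric_name : String) (metrics : List (List (String × String))) : Decidable (Pre_return_sort_in_metrics_py metric_name metrics) := by unfold Pre_return_sort_in_metrics_py; infer_instance

def pvWitness_return_sort_in_metrics_py : String × (List (List (String × String))) :=
  ("x", [[("name", "a"), ("field", "x")], [("name", "b"), ("field", "z")]])

def Spec_return_sort_in_metrics_py (metric_name : String) (metrics : List (List (String × String))) (out : String) : Prop := out = return_sort_in_metrics_py_alt metric_name metrics
instance (metric_name : String) (metrics : List (List (String × String))) (out : String) : Decidable (Spec_return_sort_in_metrics_py metric_name metrics out) := by unfold Spec_return_sort_in_metrics_py; infer_instance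

-- ===== CLAIM =====
def Claim_equal_return_sort_in_metrics_py : Prop := ∀ (metric_name : String) (metrics : List (List (String × String))), Dom_return_sort_in_metrics_py metric_name metrics → Pre_return_sort_in_metrics_py metric_name metrics → Spec_return_sort_in_metrics_py metric_name metrics (return_sort_in_metrics_py metric_name metrics)

-- ===== LEMMAS AND PROOFS =====

-- any name match is decisive for B, whatever field_name holds
theorem rsLoopB_name_match (mn : String) (ms : List (List (String × String))) (fn : Option String)
    (h : ∃ m ∈ ms, pyGetKey m "name" = mn) : rsLoopB mn ms fn = mn := by
  induction ms generalizing fn with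
  | nil => simp at h
  | cons m rest ih =>
    rcases h with ⟨m', hm', hname⟩
    rcases List.mem_cons.mp hm' with rfl | hmem
    · simp [rsLoopB, hname]
    · simp only [rsLoopB]
      split_ifs with h1 h2
      · rfl
      · exact ih _ ⟨m', hmem, hname⟩
      · exact ih _ ⟨m', hmem, hname⟩

-- with no name match and field_name already set, B just returns it
theorem rsLoopB_some (mn f : String) (ms : List (List (String × String)))
    (h : ∀ m ∈ ms, pyGetKey m "name" ≠ mn) : rsLoopB mn ms (some f) = f := by
  induction ms with
  | nil => rfl
  | cons m rest ih =>
    have hm : ¬ ((pyGetKey m "name" == mn) = true) := by simpa using h m (List.mem_cons_self ..)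
    simp only [rsLoopB]
    rw [if_neg hm]
    simpa using ih (fun m' h' => h m' (List.mem_cons_of_mem _ h'))

-- with no name match and all "field" keys present, B from 'none' computes exactly A's field-search loop
theorem rsLoopB_none (mn : String) (ms : List (List (String × String)))
    (h : ∀ m ∈ ms, pyGetKey m "name" ≠ mn) (hf : ∀ m ∈ ms, hasK m "field") :
    rsLoopB mn ms none = rsLoopA mn ms := by
  induction ms with
  | nil => rfl
  | cons m rest ih =>
    have hm : ¬ ((pyGetKey m "name" == mn) = true) := by simpa using h m (List.mem_cons_self ..)
    have hrest : ∀ m' ∈ rest, pyGetKey m' "name" ≠ mn := fun m' h' => h m' (List.mem_cons_of_mem _ h')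
    have hfrest : ∀ m' ∈ rest, hasK m' "field" := fun m' h' => hf m' (List.mem_cons_of_mem _ h')
    have hfm : hasK m "field" = true := hf m (List.mem_cons_self ..)
    have hlook : List.lookup "field" m = some (pyGetKey m "field") := by
      unfold hasK at hfm
      cases hl : List.lookup "field" m with
      | none => rw [hl] at hfm; simp at hfm
      | some v => simp [pyGetKey, hl]
    simp only [rsLoopB, rsLoopA, Option.isNone_none, Bool.true_and, hlook]
    rw [if_neg hm]
    by_cases hfeq : pyGetKey m "field" = mn
    · have h1 : ((some (pyGetKey m "field") : Option String) == some mn) = true := by simp [hfeq]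
      have h2 : (mn == pyGetKey m "field") = true := beq_iff_eq.mpr hfeq.symm
      rw [if_pos h1, if_pos h2, rsLoopB_some mn _ rest hrest]
    · have h1 : ¬ (((some (pyGetKey m "field") : Option String) == some mn) = true) := by simp [hfeq]
      have h2 : ¬ ((mn == pyGetKey m "field") = true) := fun hx => hfeq (beq_iff_eq.mp hx).symm
      rw [if_neg h1, if_neg h2, ih hrest hfrest]

-- ===== VERDICT =====
theorem return_sort_in_metrics_py_spec : Claim_equal_return_sort_in_metrics_py := by
  intro mn ms _ hpre
  rcases hpre with ⟨_, hmatch⟩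
  unfold Spec_return_sort_in_metrics_py return_sort_in_metrics_py return_sort_in_metrics_py_alt
  by_cases hn : ∃ m ∈ ms, pyGetKey m "name" = mn
  · have hc : (ms.map (fun m => pyGetKey m "name")).contains mn = true := by
      rcases hn with ⟨m, hm, he⟩
      simp only [List.contains_eq_mem, List.mem_map, decide_eq_true_eq]
      exact ⟨m, hm, he⟩
    rw [if_pos hc, rsLoopB_name_match mn ms none hn]
  · have hn' : ∀ m ∈ ms, pyGetKey m "name" ≠ mn := by
      intro m hm he; exact hn ⟨m, hm, he⟩
    have hc : ¬ ((ms.map (fun m => pyGetKey m "name")).contains mn = true) := by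
      simp only [List.contains_eq_mem, List.mem_map, decide_eq_true_eq]
      exact fun ⟨m, hm, he⟩ => hn ⟨m, hm, he⟩
    rcases hmatch with h | ⟨hfall, hf⟩
    · exact absurd h hn
    · have hfc : (ms.map (fun m => pyGetKey m "field")).contains mn = true := by
        rcases hf with ⟨m, hm, he⟩
        simp only [List.contains_eq_mem, List.mem_map, decide_eq_true_eq]
        exact ⟨m, hm, he⟩
      rw [if_neg hc, if_pos hfc, rsLoopB_none mn ms hn' hfall]
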